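-- pv_equiv track=rewrite | github.com/Kaoschuks/project_monies | monies/monies.py | parse
-- ===== SOURCE A (Python) =====
-- def parse(data):
--     """
--     Parses the input of the Santander .txt file into CSV format.
--
--     The format of the bank statement is as follows:
--
--        "From: <date> to <date>"
--
--        "Account: <number>"
--
--        "Date: <date>"
--        "Description: <description>"
--        "Amount: <amount>"
--        "Balance: <amount>"
--
--         <second_transaction_entry>
--
--     :param data: A list containing each line of the bank statement.
--     :return: A list containing parsed entries in CSV format.
--     """
--     sep = 5 * " "
--
--     # Skip headers
--     data = data[4:]
--
--     # Remove empty lines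
--     data = [d.strip() for d in data]
--     data = list(filter(None, data))
--
--     # Removing field descriptions
--     for i, d in enumerate(data):
--         if d.startswith("Date"):
--             data[i] = d.replace("Date: ", "").strip()
--
--         if d.startswith("Description"):
--             data[i] = d.replace("Description: ", "").strip()
--
--         if d.startswith("Amount"):
--             data[i] = d.replace("Amount: ", "").replace(" GBP", "").strip()
--
--         if d.startswith("Balance"):
--             data[i] = d.replace("Balance: ", "").replace(" GBP", "").strip()
--
--     # Builds CSV string
--     entries = [data[d:d+4] for d in range(0, len(data), 4)]
--     entries = [sep.join(e) for e in entries]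
--     entries = "\n".join(entries)
--
--     return entries
-- ===== SOURCE B (Python) =====
-- def _clean(s):
--     out = s
--     if s.startswith("Date"):
--         out = s.replace("Date: ", "").strip()
--     if s.startswith("Description"):
--         out = s.replace("Description: ", "").strip()
--     if s.startswith("Amount"):
--         out = s.replace("Amount: ", "").replace(" GBP", "").strip()
--     if s.startswith("Balance"):
--         out = s.replace("Balance: ", "").replace(" GBP", "").strip()
--     return out
--
--
-- def parse(data):
--     sep = 5 * " "
--     rows = []
--     buf = []
--     for line in data[4:]:
--         s = line.strip()
--         if not s:
--             continue
--         buf.append(_clean(s))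
--         if len(buf) == 4:
--             rows.append(sep.join(buf))
--             buf = []
--     if buf:
--         rows.append(sep.join(buf))
--     return "\n".join(rows)
-- ===== Notes on version B (the rewrite author's own statement) =====
-- stated objective: alternative
-- what changed: Replaces A's four-stage pipeline (slice, strip-map, filter, index-rewriting loop, then range/slice chunking and two joins) with one fused pass that strips, skips empties, cleans each field and flushes a 4-field buffer into the result as it goes.
import Mathlib
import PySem

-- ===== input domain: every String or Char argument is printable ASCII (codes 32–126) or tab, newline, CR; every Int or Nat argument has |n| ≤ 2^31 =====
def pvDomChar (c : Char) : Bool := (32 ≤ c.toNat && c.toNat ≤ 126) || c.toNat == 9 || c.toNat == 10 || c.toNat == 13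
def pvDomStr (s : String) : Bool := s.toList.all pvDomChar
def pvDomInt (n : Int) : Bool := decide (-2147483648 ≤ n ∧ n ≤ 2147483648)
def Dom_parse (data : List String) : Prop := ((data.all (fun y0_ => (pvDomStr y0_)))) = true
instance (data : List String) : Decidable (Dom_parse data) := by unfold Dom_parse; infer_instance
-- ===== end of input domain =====

-- B re-implements A's four-stage pipeline (slice, strip-map, filter, index-rewriting loop,
-- range/slice chunking, two joins) as one fused pass with a 4-field row buffer; same return value.

-- ===== PORT A =====
-- A's loop body 'for i, d in enumerate(data): if d.startswith(…): data[i] = …' (four independent ifs).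
-- The loop only writes index i at step i (after d was read), so iterating the pairs of the
-- pre-loop list is exact.
def stepA (acc : List String) (p : Int × String) : List String :=
  let i := p.1
  let d := p.2
  let acc := if PySem.Str.startswith d "Date" then
      PySem.List.pySetD acc i (PySem.Str.strip (PySem.Str.replace d "Date: " "")) else acc
  let acc := if PySem.Str.startswith d "Description" then
      PySem.List.pySetD acc i (PySem.Str.strip (PySem.Str.replace d "Description: " "")) else acc
  let acc := if PySem.Str.startswith d "Amount" then
      PySem.List.pySetD acc i (PySem.Str.strip (PySem.Str.replace (PySem.Str.replace d "Amount: " "") " GBP" "")) else acc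
  let acc := if PySem.Str.startswith d "Balance" then
      PySem.List.pySetD acc i (PySem.Str.strip (PySem.Str.replace (PySem.Str.replace d "Balance: " "") " GBP" "")) else acc
  acc

def parse (data : List String) : String :=
  let sep := "     "
  let data1 := PySem.List.slice data (some 4) none
  let data2 := data1.map (fun d => PySem.Str.strip d)
  let data3 := data2.filter (fun d => d != "")
  let data4 := (PySem.List.enumerate data3 0).foldl stepA data3
  let entries := (PySem.List.pyRange 0 (PySem.List.len data4) 4).map
      (fun d => PySem.Str.join sep (PySem.List.slice data4 (some d) (some (d + 4))))
  PySem.Str.join "\n" entries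

-- ===== PORT B =====
-- B's _clean helper: the four independent prefix tests, last assignment wins
def cleanB (s : String) : String :=
  let out := s
  let out := if PySem.Str.startswith s "Date" then
      PySem.Str.strip (PySem.Str.replace s "Date: " "") else out
  let out := if PySem.Str.startswith s "Description" then
      PySem.Str.strip (PySem.Str.replace s "Description: " "") else out
  let out := if PySem.Str.startswith s "Amount" then
      PySem.Str.strip (PySem.Str.replace (PySem.Str.replace s "Amount: " "") " GBP" "") else out
  let out := if PySem.Str.startswith s "Balance" then
      PySem.Str.strip (PySem.Str.replace (PySem.Str.replace s "Balance: " "") " GBP" "") else out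
  out

-- B's loop body: strip, skip empties, clean, flush the buffer at 4 fields
def stepB (acc : List String × List String) (line : String) : List String × List String :=
  let rows := acc.1
  let buf := acc.2
  let s := PySem.Str.strip line
  if s = "" then (rows, buf)
  else
    let buf := buf ++ [cleanB s]
    if buf.length = 4 then (rows ++ [PySem.Str.join "     " buf], ([] : List String))
    else (rows, buf)

def parse_alt (data : List String) : String :=
  let st := (PySem.List.slice data (some 4) none).foldl stepB
    (([] : List String), ([] : List String))
  let rows := if st.2 ≠ [] then st.1 ++ [PySem.Str.join "     " st.2] else st.1
  PySem.Str.join "\n" rows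

-- ===== PRECONDITION & SPEC =====
def Spec_parse (data : List String) (out : String) : Prop := out = parse_alt data
instance (data : List String) (out : String) : Decidable (Spec_parse data out) := by unfold Spec_parse; infer_instance

-- ===== CLAIM (what is proved, stated in full; the proofs are below) =====
def Claim_equal_parse : Prop := ∀ (data : List String), Dom_parse data → Spec_parse data (parse data)

-- ===== LEMMAS AND PROOFS =====

-- B's step on an already-stripped, non-empty, cleaned field
def step2 (acc : List String × List String) (c : String) : List String × List String :=
  let buf := acc.2 ++ [c]
  if buf.length = 4 then (acc.1 ++ [PySem.Str.join "     " buf], ([] : List String))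
  else (acc.1, buf)

-- the rows of the CSV: successive 4-chunks of the cleaned fields, each joined by 5 spaces
def rowsSpec : List String → List String
  | [] => []
  | x :: xs => PySem.Str.join "     " (x :: xs.take 3) :: rowsSpec (xs.drop 3)
  termination_by l => l.length
  decreasing_by simp [List.length_drop]

@[simp] lemma rowsSpec_nil : rowsSpec [] = [] := by simp [rowsSpec]

@[simp] lemma rowsSpec_cons (x : String) (xs : List String) :
    rowsSpec (x :: xs) = PySem.Str.join "     " (x :: xs.take 3) :: rowsSpec (xs.drop 3) := by
  simp [rowsSpec]

-- B's buffered chunking, abstracted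
def gRows : List String → List String → List String
  | buf, [] => if buf = [] then [] else [PySem.Str.join "     " buf]
  | buf, c :: cs =>
      if (buf ++ [c]).length = 4 then PySem.Str.join "     " (buf ++ [c]) :: gRows [] cs
      else gRows (buf ++ [c]) cs

lemma stepA_eq (pre rest : List String) (x : String) :
    stepA (pre ++ x :: rest) ((pre.length : Int), x) = pre ++ cleanB x :: rest := by
  unfold stepA cleanB
  simp only []
  split_ifs <;> simp [PySem.List.pySetD_natCast]

lemma loopA (xs : List String) : ∀ (pre post : List String),
    (PySem.List.enumerate xs ((pre.length : Nat) : Int)).foldl stepA (pre ++ xs ++ post)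
      = pre ++ xs.map cleanB ++ post := by
  induction xs with
  | nil => intro pre post; simp [PySem.List.enumerate_nil]
  | cons x xs ih =>
    intro pre post
    rw [PySem.List.enumerate_cons]
    simp only [List.foldl_cons]
    have h0 : pre ++ (x :: xs) ++ post = pre ++ x :: (xs ++ post) := by simp
    rw [h0, stepA_eq pre (xs ++ post) x]
    have h1 : ((pre.length : Nat) : Int) + 1 = (((pre ++ [cleanB x]).length : Nat) : Int) := by
      simp
    have h2 : pre ++ cleanB x :: (xs ++ post) = (pre ++ [cleanB x]) ++ xs ++ post := by simp
    rw [h1, h2, ih (pre ++ [cleanB x]) post]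
    simp

lemma loopA_main (L : List String) :
    (PySem.List.enumerate L 0).foldl stepA L = L.map cleanB := by
  have := loopA L [] []
  simpa using this

lemma chunkNat (n : Nat) : ∀ (C : List String), C.length ≤ n →
    (List.range ((C.length + 3) / 4)).map
      (fun k => PySem.Str.join "     " ((C.drop (4 * k)).take 4)) = rowsSpec C := by
  induction n with
  | zero =>
    intro C hC
    have hnil : C = [] := List.length_eq_zero_iff.mp (by omega)
    subst hnil; simp
  | succ n ih =>
    intro C hC
    cases C with
    | nil => simp
    | cons x xs =>
      have hm : ((x :: xs).length + 3) / 4 = ((xs.drop 3).length + 3) / 4 + 1 := by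
        simp [List.length_drop]; omega
      rw [hm, List.range_succ_eq_map, List.map_cons, List.map_map, rowsSpec_cons]
      refine congrArg₂ List.cons (by simp) ?_
      rw [← ih (xs.drop 3) (by simp at hC ⊢; omega)]
      apply List.map_congr_left
      intro k _
      have hdrop : (x :: xs).drop (4 * (k + 1)) = (xs.drop 3).drop (4 * k) := by
        have h41 : 4 * (k + 1) = (4 * k + 3) + 1 := by ring
        rw [h41, List.drop_succ_cons, List.drop_drop]
        congr 1; omega
      simp [Function.comp, Nat.succ_eq_add_one, hdrop]

lemma chunkA (C : List String) :
    (PySem.List.pyRange 0 ((C.length : Nat) : Int) 4).map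
      (fun d => PySem.Str.join "     " (PySem.List.slice C (some d) (some (d + 4)))) = rowsSpec C := by
  rw [PySem.List.pyRange_of_pos 0 _ (by norm_num : (0:Int) < 4)]
  rw [← chunkNat C.length C (le_refl _)]
  rcases Nat.eq_zero_or_pos C.length with h0 | hpos
  · simp [h0]
  · have hlt : (0 : Int) < (C.length : Int) := by exact_mod_cast hpos
    rw [if_pos hlt]
    have hcast : ((C.length : Int) - 0 + 4 - 1) = ((C.length + 3 : Nat) : Int) := by
      push_cast; ring
    have hcount : (((C.length : Int) - 0 + 4 - 1) / 4).toNat = (C.length + 3) / 4 := by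
      have h : ((C.length : Int) - 0 + 4 - 1) / 4 = (((C.length + 3) / 4 : Nat) : Int) := by
        push_cast; ring
      rw [h, Int.toNat_natCast]
    rw [hcount, List.map_map]
    apply List.map_congr_left
    intro k _
    have hd : (0 : Int) + 4 * (k : Int) = ((4 * k : Nat) : Int) := by push_cast; ring
    simp only [Function.comp_apply, hd]
    rw [show ((4 * k : Nat) : Int) + 4 = ((4 * k : Nat) : Int) + ((4 : Nat) : Int) by norm_num]
    rw [PySem.List.slice_natCast_add C (4 * k) 4]

lemma foldB_eq (ls : List String) : ∀ (acc : List String × List String),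
    ls.foldl stepB acc
      = (((ls.map (fun d => PySem.Str.strip d)).filter (fun d => d != "")).map cleanB).foldl step2 acc := by
  induction ls with
  | nil => intro acc; rfl
  | cons l ls ih =>
    intro acc
    by_cases hs : PySem.Str.strip l = ""
    · have hst : stepB acc l = acc := by simp [stepB, hs]
      simp [hst, hs, ih]
    · have hb : (PySem.Str.strip l != "") = true := by simpa using hs
      have hst : stepB acc l = step2 acc (cleanB (PySem.Str.strip l)) := by
        simp only [stepB, step2]
        rw [if_neg hs]
      simp only [List.foldl_cons, List.map_cons, List.filter_cons, hb, if_pos]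
      rw [hst, ih]

lemma foldStep2 (cs : List String) : ∀ (rows buf : List String),
    (let st := cs.foldl step2 (rows, buf)
     if st.2 ≠ [] then st.1 ++ [PySem.Str.join "     " st.2] else st.1)
      = rows ++ gRows buf cs := by
  induction cs with
  | nil =>
    intro rows buf
    by_cases hb : buf = [] <;> simp [gRows, hb]
  | cons c cs ih =>
    intro rows buf
    simp only [List.foldl_cons, gRows]
    by_cases h4 : (buf ++ [c]).length = 4
    · have hst : step2 (rows, buf) c = (rows ++ [PySem.Str.join "     " (buf ++ [c])], []) := by
        simp only [step2]
        rw [if_pos (by simpa using h4)]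
      rw [hst, if_pos h4, ih]
      simp
    · have hst : step2 (rows, buf) c = (rows, buf ++ [c]) := by
        simp only [step2]
        rw [if_neg (by simpa using h4)]
      rw [hst, if_neg h4, ih]

lemma gRows_eq (cs : List String) : ∀ (buf : List String), buf.length ≤ 3 →
    gRows buf cs = rowsSpec (buf ++ cs) := by
  induction cs with
  | nil =>
    intro buf hb
    rcases buf with _ | ⟨a, _ | ⟨b, _ | ⟨c, _ | ⟨d, t⟩⟩⟩⟩
    · simp [gRows]
    · simp [gRows]
    · simp [gRows]
    · simp [gRows]
    · simp only [List.length_cons] at hb; omega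
  | cons c cs ih =>
    intro buf hb
    rw [gRows]
    by_cases h4 : (buf ++ [c]).length = 4
    · rw [if_pos h4, ih [] (by norm_num)]
      rcases buf with _ | ⟨a, _ | ⟨b, _ | ⟨d, _ | ⟨e, t⟩⟩⟩⟩
      · simp at h4
      · simp at h4
      · simp at h4
      · simp
      · simp only [List.length_cons] at hb; omega
    · rw [if_neg h4, ih (buf ++ [c]) (by simp at h4 ⊢; omega)]
      simp

lemma slice4 (data : List String) :
    PySem.List.slice data (some 4) none = data.drop 4 := by
  rw [show (4 : Int) = ((4 : Nat) : Int) by norm_num, PySem.List.slice_from_natCast]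

-- ===== VERDICT (by name: the statement is the Claim_ definition above) =====
theorem parse_spec : Claim_equal_parse := by
  intro data _hdom
  show parse data = parse_alt data
  unfold parse parse_alt
  simp only [slice4]
  set L := ((data.drop 4).map (fun d => PySem.Str.strip d)).filter (fun d => d != "") with hL
  rw [loopA_main L]
  rw [foldB_eq (data.drop 4) ([], [])]
  rw [← hL, foldStep2 (L.map cleanB) [] []]
  rw [gRows_eq (L.map cleanB) [] (by norm_num)]
  simp only [List.nil_append]
  rw [show PySem.List.len (L.map cleanB) = (((L.map cleanB).length : Nat) : Int) by
        simp [PySem.List.len_eq]]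
  rw [chunkA (L.map cleanB)]
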